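-- pv_equiv track=rewrite | github.com/vyshuks/DSAlgo | leetcode/smallest_string_with_a_given_numeric_value.py | getSmallestString
-- ===== SOURCE A (Python) =====
-- def getSmallestString(n: int, k: int) -> str:
--     arr = ["a"] * n
--
--
--     required = k-n
--     i = n-1
--     while required > 0:
--         m = min(25, required)
--         arr[i] = chr(ord('a')+m)
--         required-=m
--         i-=1
--     return "".join(arr)
-- ===== SOURCE B (Python) =====
-- def getSmallestString(n: int, k: int) -> str:
--     required = k - n
--     if required <= 0:
--         return "a" * n
--     q, r = divmod(required, 25)
--     mid = chr(ord('a') + r) if r else ""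
--     return "a" * (n - q - (1 if r else 0)) + mid + "z" * q
-- ===== Notes on version B (the rewrite author's own statement) =====
-- stated objective: faster
-- what changed: Replaces the per-position while loop with a closed form: q = (k-n)//25 'z' characters, one partial character from the remainder, and an 'a' prefix, built by three concatenations.
-- intended difference: For 1 <= n and k > 26*n (k too large for any length-n string), A's index goes negative and wraps, overwriting earlier cells and returning a length-n string of leftover loop state (e.g. A(1,28)='c'), while B returns the string its counts dictate ('cz'); no correct answer exists there and B's un-contorted value is the intended behaviour of its algorithm. — e.g. on getSmallestString(1, 28): A returns "c", B returns "cz"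
import Mathlib
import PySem

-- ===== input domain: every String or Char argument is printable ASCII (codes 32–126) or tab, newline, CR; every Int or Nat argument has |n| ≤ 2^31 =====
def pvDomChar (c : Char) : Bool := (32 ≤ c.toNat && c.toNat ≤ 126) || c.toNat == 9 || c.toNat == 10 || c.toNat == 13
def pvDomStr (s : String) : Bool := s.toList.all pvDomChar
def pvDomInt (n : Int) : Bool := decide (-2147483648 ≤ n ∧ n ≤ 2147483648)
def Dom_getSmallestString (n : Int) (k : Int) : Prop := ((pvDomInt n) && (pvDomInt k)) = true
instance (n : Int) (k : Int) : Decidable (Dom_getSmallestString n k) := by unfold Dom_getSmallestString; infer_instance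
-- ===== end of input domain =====

-- B replaces A's per-position while loop by a closed form (counts from division) built with
-- three concatenations; equivalence is about the return value (A mutates only its local list).

-- ===== PORT A =====
-- arr[i] = c with Python's negative-index rule; an out-of-range index raises IndexError in
-- Python — those inputs are excluded by Pre_, so the unchanged-list value here is never reached
-- inside Pre_ (exact on Pre_).
def pySetA (xs : List Char) (i : Int) (c : Char) : List Char :=
  let j : Int := if i < 0 then i + xs.length else i
  if 0 ≤ j ∧ j < xs.length then xs.set j.toNat c else xs

-- the while loop, step for step: state (arr, required, i)
def loopA (arr : List Char) (required : Int) (i : Int) : List Char :=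
  if 0 < required then
    let m := min 25 required
    loopA (pySetA arr i (Char.ofNat (97 + m.toNat))) (required - m) (i - 1)
  else arr
termination_by required.toNat
decreasing_by omega

def getSmallestString (n : Int) (k : Int) : String :=
  String.ofList (loopA (List.replicate n.toNat 'a') (k - n) (n - 1))

-- ===== PORT B =====
def getSmallestString_alt (n : Int) (k : Int) : String :=
  let required := k - n
  if required ≤ 0 then String.ofList (List.replicate n.toNat 'a')
  else
    let q := PySem.Int.floordiv required 25
    let r := PySem.Int.mod required 25
    let e : Int := if r = 0 then 0 else 1
    let mid : List Char := if r = 0 then [] else [Char.ofNat (97 + r.toNat)]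
    String.ofList (List.replicate (n - q - e).toNat 'a' ++ mid ++ List.replicate q.toNat 'z')

-- ===== PRECONDITION & SPEC =====
-- Pre_ is exactly the inputs on which Python A returns (no IndexError): either the loop never
-- runs (k ≤ n) or every arr[i] access, including the negatively-wrapped ones, stays in range
-- (1 ≤ n and k ≤ 51*n, i.e. at most 2n loop iterations).
def Pre_getSmallestString (n : Int) (k : Int) : Prop := k ≤ n ∨ (1 ≤ n ∧ k ≤ 51 * n)
instance (n : Int) (k : Int) : Decidable (Pre_getSmallestString n k) := by unfold Pre_getSmallestString; infer_instance
def pvWitness_getSmallestString : Int × Int := (3, 40)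

-- For 1 ≤ n and k > 26*n (k too large for any length-n string) A's index goes negative and
-- wraps, overwriting earlier cells and returning leftover loop state (e.g. A(1,28) = "c"),
-- while B returns the string its counts dictate ("cz"); no correct answer exists there and B's
-- un-contorted value is the intended behaviour of its algorithm.
def D_getSmallestString (n : Int) (k : Int) : Prop := 1 ≤ n ∧ 26 * n < k
instance (n : Int) (k : Int) : Decidable (D_getSmallestString n k) := by unfold D_getSmallestString; infer_instance

def Spec_getSmallestString (n : Int) (k : Int) (out : String) : Prop := ¬ D_getSmallestString n k → out = getSmallestString_alt n k
instance (n : Int) (k : Int) (out : String) : Decidable (Spec_getSmallestString n k out) := by unfold Spec_getSmallestString; infer_instance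

def pvDiffWitness_getSmallestString : Int × Int := (1, 28)
def pvDiffWitnessOut_getSmallestString : String × String := ("c", "cz")

-- ===== CLAIM (what is proved, stated in full; the proofs are below) =====
def Claim_unchanged_getSmallestString : Prop := ∀ (n : Int) (k : Int), Dom_getSmallestString n k → Pre_getSmallestString n k → Spec_getSmallestString n k (getSmallestString n k)
def Claim_changed_getSmallestString : Prop := Dom_getSmallestString (pvDiffWitness_getSmallestString.1) (pvDiffWitness_getSmallestString.2) ∧ Pre_getSmallestString (pvDiffWitness_getSmallestString.1) (pvDiffWitness_getSmallestString.2) ∧ D_getSmallestString (pvDiffWitness_getSmallestString.1) (pvDiffWitness_getSmallestString.2) ∧ getSmallestString (pvDiffWitness_getSmallestString.1) (pvDiffWitness_getSmallestString.2) = pvDiffWitnessOut_getSmallestString.1 ∧ getSmallestString_alt (pvDiffWitness_getSmallestString.1) (pvDiffWitness_getSmallestString.2) = pvDiffWitnessOut_getSmallestString.2 ∧ pvDiffWitnessOut_getSmallestString.1 ≠ pvDiffWitnessOut_getSmallestString.2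
def Claim_exact_getSmallestString : Prop := ∀ (n : Int) (k : Int), Dom_getSmallestString n k → Pre_getSmallestString n k → D_getSmallestString n k → getSmallestString n k ≠ getSmallestString_alt n k

-- ===== LEMMAS AND PROOFS =====

theorem set_replicate_append (p : Nat) (hp : 1 ≤ p) (L : List Char) (c : Char) :
    (List.replicate p 'a' ++ L).set (p - 1) c = List.replicate (p - 1) 'a' ++ c :: L := by
  have h : List.replicate p 'a' = List.replicate (p-1) 'a' ++ ['a'] := by
    rw [← List.replicate_succ']; congr 1; omega
  rw [h, List.append_assoc, List.set_append_right (p-1) c (by simp)]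
  simp

theorem pySetA_last (p s : Nat) (hp : 1 ≤ p) (c : Char) :
    pySetA (List.replicate p 'a' ++ List.replicate s 'z') ((p : Int) - 1) c
      = List.replicate (p - 1) 'a' ++ c :: List.replicate s 'z' := by
  unfold pySetA
  have hlen : (List.replicate p 'a' ++ List.replicate s 'z').length = p + s := by simp
  have hj : ¬ ((p : Int) - 1 < 0) := by omega
  simp only [hlen, hj, if_false]
  rw [if_pos (by constructor <;> omega)]
  have : ((p : Int) - 1).toNat = p - 1 := by omega
  rw [this, set_replicate_append p hp]

theorem loopA_core (R : Int) (p s : Nat) (h1 : 1 ≤ R) (h2 : R ≤ 25 * p) :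
    loopA (List.replicate p 'a' ++ List.replicate s 'z') R ((p : Int) - 1) =
      List.replicate (p - (R / 25).toNat - (if R % 25 = 0 then 0 else 1)) 'a'
        ++ (if R % 25 = 0 then ([] : List Char) else [Char.ofNat (97 + (R % 25).toNat)])
        ++ List.replicate ((R / 25).toNat + s) 'z' := by
  have hp : 1 ≤ p := by omega
  rw [loopA, if_pos (by omega)]
  by_cases h25 : R ≤ 25
  · -- last iteration: m = R
    have hm : min 25 R = R := by omega
    simp only [hm]
    rw [pySetA_last p s hp, loopA, if_neg (by omega)]
    by_cases hR : R = 25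
    · subst hR
      norm_num
      have : Char.ofNat (97 + (25:Int).toNat) = 'z' := by decide
      rw [this, ← List.replicate_succ, Nat.add_comm]
    · have hq : R / 25 = 0 := by omega
      have hr : R % 25 = R := by omega
      have hrne : ¬ (R % 25 = 0) := by omega
      have hR0 : ¬ (R = 0) := by omega
      simp only [hq, hr, if_neg hR0, Int.toNat_zero, Nat.sub_zero, Nat.zero_add]
      simp
  · -- m = 25, recurse
    have hm : min 25 R = 25 := by omega
    simp only [hm]
    rw [pySetA_last p s hp]
    have hc : Char.ofNat (97 + (25:Int).toNat) = 'z' := by decide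
    rw [hc]
    have harr : List.replicate (p - 1) 'a' ++ 'z' :: List.replicate s 'z'
        = List.replicate (p - 1) 'a' ++ List.replicate (s + 1) 'z' := by
      rw [← List.replicate_succ]
    have hi : (p : Int) - 1 - 1 = ((p - 1 : Nat) : Int) - 1 := by omega
    rw [harr, hi, loopA_core (R - 25) (p - 1) (s + 1) (by omega) (by omega)]
    have e1 : (R - 25) / 25 = R / 25 - 1 := by omega
    have e2 : (R - 25) % 25 = R % 25 := by omega
    have e3 : 1 ≤ R / 25 := by omega
    rw [e1, e2]
    have h4 : p - 1 - (R / 25 - 1).toNat - (if R % 25 = 0 then 0 else 1)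
        = p - (R / 25).toNat - (if R % 25 = 0 then 0 else 1) := by split <;> omega
    have h5 : (R / 25 - 1).toNat + (s + 1) = (R / 25).toNat + s := by omega
    rw [h4, h5]
termination_by R.toNat
decreasing_by omega

theorem loopA_length (R i : Int) (arr : List Char) : (loopA arr R i).length = arr.length := by
  fun_induction loopA arr R i with
  | case1 a b c h m ih =>
    rw [ih]
    unfold pySetA
    dsimp only
    split <;> split <;> simp
  | case2 => rfl

-- ===== VERDICT (by name: the statement is the Claim_ definition above) =====
theorem getSmallestString_spec : Claim_unchanged_getSmallestString := by
  intro n k hdom hpre hnd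
  unfold getSmallestString getSmallestString_alt
  by_cases hk : k - n ≤ 0
  · simp only [if_pos hk]
    rw [loopA, if_neg (by omega)]
  · have hn1 : 1 ≤ n := by
      rcases hpre with h | ⟨h, _⟩ <;> omega
    have h26 : k ≤ 26 * n := by
      unfold D_getSmallestString at hnd
      omega
    simp only [if_neg hk]
    have hq : PySem.Int.floordiv (k - n) 25 = (k - n) / 25 :=
      PySem.Int.floordiv_eq_ediv_of_pos (by norm_num)
    have hm : PySem.Int.mod (k - n) 25 = (k - n) % 25 :=
      PySem.Int.mod_eq_emod_of_pos (by norm_num)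
    simp only [hq, hm]
    have harr : List.replicate n.toNat 'a' = List.replicate n.toNat 'a' ++ List.replicate 0 'z' := by
      simp
    have hi : n - 1 = ((n.toNat : Int)) - 1 := by omega
    rw [harr, hi, loopA_core (k - n) n.toNat 0 (by omega) (by omega)]
    have hqle : (k - n) / 25 ≤ n := by omega
    have hq0 : 0 ≤ (k - n) / 25 := by omega
    congr 1
    by_cases hr : (k - n) % 25 = 0
    · have hr' : ¬ ((k - n) % 25 ≠ 0) := by omega
      simp only [if_pos hr]
      have h4 : (n - (k - n) / 25 - 0).toNat = n.toNat - ((k - n) / 25).toNat - 0 := by omega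
      rw [h4]
      simp
    · have hqlt : (k - n) / 25 < n := by omega
      simp only [if_neg hr]
      have h4 : (n - (k - n) / 25 - 1).toNat = n.toNat - ((k - n) / 25).toNat - 1 := by omega
      rw [h4]
      simp

theorem getSmallestString_changed : Claim_changed_getSmallestString := by
  unfold Claim_changed_getSmallestString
  refine ⟨by decide, by decide, by decide, ?_, by decide, by decide⟩
  show String.ofList (loopA (List.replicate (1:Int).toNat 'a') (28 - 1) (1 - 1)) = "c"
  have h : loopA (List.replicate (1:Int).toNat 'a') (28 - 1) (1 - 1) = ['c'] := by
    have cz : Char.ofNat (97 + Int.toNat 25) = 'z' := by decide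
    have cc : Char.ofNat (97 + Int.toNat 2) = 'c' := by decide
    rw [loopA]; norm_num [pySetA, cz, cc]
    rw [loopA]; norm_num [pySetA, cz, cc]
    rw [loopA]; norm_num
  rw [h]

theorem getSmallestString_tight : Claim_exact_getSmallestString := by
  intro n k hdom hpre hd heq
  obtain ⟨hn1, h26⟩ := hd
  have hR : 25 * n < k - n := by omega
  have hk : ¬ (k - n ≤ 0) := by omega
  unfold getSmallestString getSmallestString_alt at heq
  rw [if_neg hk] at heq
  have hl := String.ofList_inj.mp heq
  have hlen : (loopA (List.replicate n.toNat 'a') (k - n) (n - 1)).length = n.toNat := by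
    rw [loopA_length]; simp
  rw [hl] at hlen
  have hq : PySem.Int.floordiv (k - n) 25 = (k - n) / 25 :=
    PySem.Int.floordiv_eq_ediv_of_pos (by norm_num)
  have hm : PySem.Int.mod (k - n) 25 = (k - n) % 25 :=
    PySem.Int.mod_eq_emod_of_pos (by norm_num)
  simp only [hq, hm, List.length_append, List.length_replicate] at hlen
  by_cases hr : (k - n) % 25 = 0
  · have hge : n + 1 ≤ (k - n) / 25 := by omega
    simp only [if_pos hr, List.length_nil] at hlen
    omega
  · have hge : n ≤ (k - n) / 25 := by omega
    simp only [if_neg hr, List.length_cons, List.length_nil] at hlen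
    omega
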